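-- pv_equiv track=rewrite | github.com/mortyc126-debug/rayon | tension/stdlib.py | _collect_xor_constraints
-- ===== SOURCE A (Python) =====
-- def _collect_xor_constraints(output_bits, target_bits):
--     """
--     Given output bits (may contain None) and target bits (known),
--     collect constraints. For bits where output is known and
--     differs from target, the system is inconsistent.
--     Returns (constraints_ok, fixed_positions) where fixed_positions
--     maps bit index to required value.
--     """
--     fixed = {}
--     for i, (ob, tb) in enumerate(zip(output_bits, target_bits)):
--         if tb is None:
--             continue  # target bit unknown, no constraint
--         if ob is not None:
--             if ob != tb:
--                 return False, {}  # inconsistent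
--         else:
--             fixed[i] = tb
--     return True, fixed
-- ===== SOURCE B (Python) =====
-- def _collect_xor_constraints(output_bits, target_bits):
--     pairs = list(zip(output_bits, target_bits))
--     if any(ob is not None and tb is not None and ob != tb for ob, tb in pairs):
--         return False, {}
--     return True, {i: tb for i, (ob, tb) in enumerate(pairs) if tb is not None and ob is None}
-- ===== Notes on version B (the rewrite author's own statement) =====
-- stated objective: simpler
-- what changed: Replaces the single interleaved check-and-accumulate loop with early return by two separate passes: an any() consistency check over the zipped pairs, then a dict comprehension over enumerate collecting the fixed positions.
import Mathlib
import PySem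

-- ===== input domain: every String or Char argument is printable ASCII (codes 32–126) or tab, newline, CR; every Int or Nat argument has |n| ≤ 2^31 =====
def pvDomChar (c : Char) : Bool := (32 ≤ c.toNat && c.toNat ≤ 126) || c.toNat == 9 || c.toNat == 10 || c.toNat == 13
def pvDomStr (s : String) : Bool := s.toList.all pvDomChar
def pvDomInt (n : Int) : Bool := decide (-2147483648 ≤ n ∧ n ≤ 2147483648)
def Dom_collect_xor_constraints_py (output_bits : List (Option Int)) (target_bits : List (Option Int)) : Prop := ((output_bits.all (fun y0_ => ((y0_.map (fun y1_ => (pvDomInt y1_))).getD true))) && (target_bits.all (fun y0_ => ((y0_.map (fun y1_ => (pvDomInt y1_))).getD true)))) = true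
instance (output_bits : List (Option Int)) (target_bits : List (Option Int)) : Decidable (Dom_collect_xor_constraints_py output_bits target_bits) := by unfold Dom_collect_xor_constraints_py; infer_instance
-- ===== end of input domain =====

-- B replaces A's single interleaved check-and-accumulate loop (with early return) by two
-- separate passes: an any() consistency check, then a comprehension collecting fixed positions.


-- ===== PORT A =====
-- A's for-loop with its `fixed` dict accumulator and early `return False, {}`
def pvAuxA : List (Int × (Option Int × Option Int)) → PySem.Dict Int Int → Bool × (List (Int × Int))
  | [], fixed => (true, fixed.items)
  | (i, (ob, tb)) :: rest, fixed =>
    match tb with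
    | none => pvAuxA rest fixed
    | some t =>
      match ob with
      | some o => if o ≠ t then (false, []) else pvAuxA rest fixed
      | none => pvAuxA rest (fixed.insert i t)

def collect_xor_constraints_py (output_bits : List (Option Int)) (target_bits : List (Option Int)) : Bool × (List (Int × Int)) :=
  pvAuxA (PySem.List.enumerate (output_bits.zip target_bits) 0) PySem.Dict.empty

-- ===== PORT B =====
def collect_xor_constraints_py_alt (output_bits : List (Option Int)) (target_bits : List (Option Int)) : Bool × (List (Int × Int)) :=
  let pairs := output_bits.zip target_bits
  if pairs.any (fun p => p.1.isSome && p.2.isSome && p.1 != p.2) then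
    (false, [])
  else
    (true, (PySem.List.enumerate pairs 0).filterMap (fun q =>
      match q.2.2, q.2.1 with
      | some t, none => some (q.1, t)
      | _, _ => none))

-- ===== PRECONDITION & SPEC =====
def Spec_collect_xor_constraints_py (output_bits : List (Option Int)) (target_bits : List (Option Int)) (out : Bool × (List (Int × Int))) : Prop := out = collect_xor_constraints_py_alt output_bits target_bits
instance (output_bits : List (Option Int)) (target_bits : List (Option Int)) (out : Bool × (List (Int × Int))) : Decidable (Spec_collect_xor_constraints_py output_bits target_bits out) := by unfold Spec_collect_xor_constraints_py; infer_instance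

-- ===== CLAIM (what is proved, stated in full; the proofs are below) =====
def Claim_equal_collect_xor_constraints_py : Prop := ∀ (output_bits : List (Option Int)) (target_bits : List (Option Int)), Dom_collect_xor_constraints_py output_bits target_bits → Spec_collect_xor_constraints_py output_bits target_bits (collect_xor_constraints_py output_bits target_bits)

-- ===== LEMMAS AND PROOFS =====

-- `any` of the inconsistency predicate over an enumerated list ignores the indices
theorem pvAny_enum :
    ∀ (xs : List (Option Int × Option Int)) (s : Int),
      ((PySem.List.enumerate xs s).any (fun q => q.2.1.isSome && q.2.2.isSome && q.2.1 != q.2.2)) =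
        xs.any (fun p => p.1.isSome && p.2.isSome && p.1 != p.2) := by
  intro xs
  induction xs with
  | nil => intro s; simp [PySem.List.enumerate_nil]
  | cons x xs ih => intro s; simp only [PySem.List.enumerate_cons, List.any_cons, ih]

-- characterisation of A's loop: check first, then the collected pairs appended to fixed
theorem pvAuxA_eq (l : List (Int × (Option Int × Option Int))) :
    ∀ (fixed : PySem.Dict Int Int),
      (∀ p ∈ l, fixed.contains p.1 = false) →
      (l.map (·.1)).Nodup → fixed.keys.Nodup →
      pvAuxA l fixed =
        if l.any (fun q => q.2.1.isSome && q.2.2.isSome && q.2.1 != q.2.2) then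
          (false, [])
        else
          (true, fixed.items ++ l.filterMap (fun q =>
            match q.2.2, q.2.1 with
            | some t, none => some (q.1, t)
            | _, _ => none)) := by
  induction l with
  | nil => intro fixed _ _ _; simp [pvAuxA]
  | cons hd tl ih =>
    intro fixed hfresh hnd hkeys
    obtain ⟨i, ob, tb⟩ := hd
    match tb, ob with
    | none, ob =>
      have hrec := ih fixed (fun p hp => hfresh p (List.mem_cons_of_mem _ hp))
        (List.Nodup.of_cons hnd) hkeys
      cases ob <;>
        simp only [pvAuxA, hrec, List.any_cons, List.filterMap_cons, Option.isSome_none,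
          Option.isSome_some, Bool.false_and, Bool.and_false, Bool.false_or]
    | some t, some o =>
      by_cases h : o = t
      · have hrec := ih fixed (fun p hp => hfresh p (List.mem_cons_of_mem _ hp))
          (List.Nodup.of_cons hnd) hkeys
        simp only [pvAuxA, h, hrec, List.any_cons, List.filterMap_cons, Option.isSome_some,
          Bool.true_and, bne_self_eq_false, Bool.false_or]
        rw [if_neg (by simp)]
      · have hbne : ((some o : Option Int) != some t) = true := by simp [h]
        simp only [pvAuxA, List.any_cons, Option.isSome_some, Bool.true_and, hbne,
          Bool.true_or]
        simp [h]
    | some t, none =>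
      have hin : fixed.contains i = false := hfresh (i, none, some t) List.mem_cons_self
      have hfresh' : ∀ p ∈ tl, (fixed.insert i t).contains p.1 = false := by
        intro p hp
        have hni : i ∉ tl.map (·.1) := (List.nodup_cons.mp hnd).1
        have hne : p.1 ≠ i := by
          intro h
          exact hni (h ▸ (List.mem_map_of_mem hp : p.1 ∈ tl.map (·.1)))
        rw [PySem.Dict.contains_insert]
        simp [hne, hfresh p (List.mem_cons_of_mem _ hp)]
      have hkeys' : (fixed.insert i t).keys.Nodup := PySem.Dict.nodup_keys_insert _ _ _ hkeys
      have hrec := ih (fixed.insert i t) hfresh' (List.Nodup.of_cons hnd) hkeys'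
      simp only [pvAuxA, hrec, PySem.Dict.items_insert_of_not_contains fixed t hin,
        List.any_cons, List.filterMap_cons, Option.isSome_none, Option.isSome_some,
        Bool.false_and, Bool.false_or, List.append_assoc, List.singleton_append]

-- ===== VERDICT (by name: the statement is the Claim_ definition above) =====
theorem collect_xor_constraints_py_spec : Claim_equal_collect_xor_constraints_py := by
  intro output_bits target_bits _
  unfold Spec_collect_xor_constraints_py collect_xor_constraints_py collect_xor_constraints_py_alt
  have hnd : ((PySem.List.enumerate (output_bits.zip target_bits) 0).map (·.1)).Nodup := by
    rw [List.Nodup, List.pairwise_map]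
    exact (PySem.List.pairwise_lt_enumerate _ _).imp (fun h => ne_of_lt h)
  rw [pvAuxA_eq _ PySem.Dict.empty (by simp [PySem.Dict.contains_empty]) hnd
      PySem.Dict.nodup_keys_empty]
  simp only [pvAny_enum, PySem.Dict.empty, List.nil_append]
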